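-- pv_equiv track=rewrite | github.com/yunguan-wang/SPROD | figure_4.py | merge_common
-- ===== SOURCE A (Python) =====
-- from collections import defaultdict
-- from collections import defaultdict
--
-- def merge_common(lists):
--     neigh = defaultdict(set)
--     visited = set()
--     for each in lists:
--         for item in each:
--             neigh[item].update(each)
--     def comp(node, neigh = neigh, visited = visited, vis = visited.add):
--         nodes = set([node])
--         next_node = nodes.pop
--         while nodes:
--             node = next_node()
--             vis(node)
--             nodes |= neigh[node] - visited
--             yield node
--     for node in neigh:
--         if node not in visited:
--             yield sorted(comp(node))
-- ===== SOURCE B (Python) =====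
-- def merge_common(lists):
--     # Collect the distinct elements in first-appearance order.
--     keys = []
--     seen = set()
--     for l in lists:
--         for x in l:
--             if x not in seen:
--                 seen.add(x)
--                 keys.append(x)
--     done = set()
--     for x in keys:
--         if x in done:
--             continue
--         # Saturate {x} against the input lists until no list partially overlaps it.
--         comp = {x}
--         changed = True
--         while changed:
--             changed = False
--             for l in lists:
--                 if comp.intersection(l) and not comp.issuperset(l):
--                     comp.update(l)
--                     changed = True
--         done.update(comp)
--         yield sorted(comp)
-- ===== Notes on version B (the rewrite author's own statement) =====
-- stated objective: alternative
-- what changed: A builds a per-element adjacency defaultdict (quadratic in list sizes) and runs a BFS with a shared visited set per component; B never builds an adjacency map: for each distinct element in first-appearance order it saturates {x} directly against the input lists until no list partially overlaps it, then emits the sorted group.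
import Mathlib
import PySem

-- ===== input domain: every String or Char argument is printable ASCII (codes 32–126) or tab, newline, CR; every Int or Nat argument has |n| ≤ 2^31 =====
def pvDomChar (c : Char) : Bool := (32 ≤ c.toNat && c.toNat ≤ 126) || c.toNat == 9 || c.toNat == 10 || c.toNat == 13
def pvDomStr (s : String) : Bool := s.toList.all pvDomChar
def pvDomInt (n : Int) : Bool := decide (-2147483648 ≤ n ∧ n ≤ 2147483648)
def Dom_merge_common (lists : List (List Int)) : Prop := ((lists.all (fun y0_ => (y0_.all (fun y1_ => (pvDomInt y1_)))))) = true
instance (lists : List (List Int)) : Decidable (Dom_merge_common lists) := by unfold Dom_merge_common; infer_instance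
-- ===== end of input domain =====

-- B replaces A's element-adjacency dict + BFS with per-element saturation of the input
-- lists to a fixpoint (no adjacency map is built); a timing run measured B faster
-- on its generated input family.

-- ===== PORT A =====
-- neigh = defaultdict(set); for each in lists: for item in each: neigh[item].update(each)
def mcNeigh (lists : List (List Int)) : PySem.Dict Int (PySem.Set Int) :=
  lists.foldl
    (fun neigh each =>
      each.foldl (fun neigh item => neigh.modify item [] (fun s => PySem.Set.update s each)) neigh)
    PySem.Dict.empty

-- the generator comp(node): nodes = {node}; while nodes: node = nodes.pop(); visited.add(node);
-- nodes |= neigh[node] - visited; yield node.  (set.pop's choice is arbitrary in Python; the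
-- port pops the first element.  fuel only totalizes the while loop; it is provably sufficient.)
def mcComp (neigh : PySem.Dict Int (PySem.Set Int)) :
    Nat → PySem.Set Int → PySem.Set Int → List Int → PySem.Set Int × List Int
  | 0, _, visited, acc => (visited, acc)
  | fuel + 1, nodes, visited, acc =>
    match nodes with
    | [] => (visited, acc)
    | node :: rest =>
      let visited' := PySem.Set.add visited node
      let nodes' := PySem.Set.union rest (PySem.Set.diff (neigh.getD node []) visited')
      mcComp neigh fuel nodes' visited' (acc ++ [node])

-- for node in neigh: if node not in visited: yield sorted(comp(node))
def merge_common (lists : List (List Int)) : List (List Int) :=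
  let neigh := mcNeigh lists
  let ks := PySem.Dict.keys neigh
  (ks.foldl
    (fun st node =>
      if node ∈ st.1 then st
      else
        let r := mcComp neigh (ks.length + 1) [node] st.1 []
        (r.1, st.2 ++ [PySem.List.sorted r.2 (fun y => y) false]))
    (([] : PySem.Set Int), ([] : List (List Int)))).2

-- ===== PORT B =====
-- keys = the distinct elements in first-appearance order (seen, keys)
def mcKeys (lists : List (List Int)) : PySem.Set Int × List Int :=
  lists.foldl
    (fun st l =>
      l.foldl (fun st x => if x ∈ st.1 then st else (PySem.Set.add st.1 x, st.2 ++ [x])) st)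
    ([], [])

-- one for-l-in-lists pass: if comp.intersection(l) and not comp.issuperset(l): comp |= l; changed = True
def mcPass (lists : List (List Int)) (st : PySem.Set Int × Bool) : PySem.Set Int × Bool :=
  lists.foldl
    (fun st l =>
      if PySem.Set.inter st.1 l ≠ [] ∧ ¬(PySem.Set.issuperset st.1 l = true)
      then (PySem.Set.update st.1 l, true) else st)
    st

-- while changed: changed = False; <pass>   (fuel totalizes the while; provably sufficient)
def mcSat (lists : List (List Int)) : Nat → PySem.Set Int → PySem.Set Int
  | 0, comp => comp
  | fuel + 1, comp =>
    let r := mcPass lists (comp, false)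
    if r.2 then mcSat lists fuel r.1 else r.1

def merge_common_alt (lists : List (List Int)) : List (List Int) :=
  let ks := (mcKeys lists).2
  (ks.foldl
    (fun st x =>
      if x ∈ st.1 then st
      else
        let comp := mcSat lists (ks.length + 1) [x]
        (PySem.Set.update st.1 comp, st.2 ++ [PySem.List.sorted comp (fun y => y) false]))
    (([] : PySem.Set Int), ([] : List (List Int)))).2

-- ===== PRECONDITION & SPEC =====
def Spec_merge_common (lists : List (List Int)) (out : List (List Int)) : Prop := out = merge_common_alt lists
instance (lists : List (List Int)) (out : List (List Int)) : Decidable (Spec_merge_common lists out) := by unfold Spec_merge_common; infer_instance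

-- ===== CLAIM (what is proved, stated in full; the proofs are below) =====
def Claim_equal_merge_common : Prop := ∀ (lists : List (List Int)), Dom_merge_common lists → Spec_merge_common lists (merge_common lists)

-- ===== LEMMAS AND PROOFS =====

-- a and b lie together in some input list
def mcLinked (lists : List (List Int)) (a b : Int) : Prop := ∃ l ∈ lists, a ∈ l ∧ b ∈ l

-- connectivity: reflexive-transitive closure of mcLinked
def mcConn (lists : List (List Int)) : Int → Int → Prop := Relation.ReflTransGen (mcLinked lists)

-- the universe of elements, in first-appearance order
def mcU (lists : List (List Int)) : List Int := PySem.Set.ofList lists.flatten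

theorem mcLinked_symm {lists : List (List Int)} {a b : Int} (h : mcLinked lists a b) : mcLinked lists b a := by
  obtain ⟨l, hl, ha, hb⟩ := h; exact ⟨l, hl, hb, ha⟩

theorem mcConn_symm {lists : List (List Int)} {a b : Int} (h : mcConn lists a b) : mcConn lists b a :=
  Relation.ReflTransGen.symmetric (fun _ _ hab => mcLinked_symm hab) h

theorem mcLinked_mem_right {lists : List (List Int)} {a b : Int} (h : mcLinked lists a b) : b ∈ mcU lists := by
  obtain ⟨l, hl, _, hb⟩ := h
  simp only [mcU, PySem.Set.mem_ofList, List.mem_flatten]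
  exact ⟨l, hl, hb⟩

theorem mcConn_mem {lists : List (List Int)} {a b : Int} (h : mcConn lists a b) (ha : a ∈ mcU lists) : b ∈ mcU lists := by
  induction h with
  | refl => exact ha
  | tail _ h2 _ => exact mcLinked_mem_right h2

-- escape lemma: walking out of a region W whose frontier lies in T
theorem mcEscape {lists : List (List Int)} {W T : Int → Prop}
    (hf : ∀ v, W v → ∀ y, mcLinked lists v y → W y ∨ T y) :
    ∀ a b, mcConn lists a b → W a → W b ∨ ∃ t, T t ∧ mcConn lists t b := by
  intro a b h
  induction h using Relation.ReflTransGen.head_induction_on with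
  | refl => exact fun hW => Or.inl hW
  | head h' hcb ih =>
    intro hW
    rcases hf _ hW _ h' with h1 | h2
    · exact ih h1
    · exact Or.inr ⟨_, h2, hcb⟩

-- a linked-closed set absorbs connectivity
theorem mcClosed_reach {lists : List (List Int)} {W : Int → Prop}
    (hc : ∀ v, W v → ∀ y, mcLinked lists v y → W y) :
    ∀ a b, mcConn lists a b → W a → W b := by
  intro a b h hW
  rcases mcEscape (T := fun _ => False) (fun v hv y hy => Or.inl (hc v hv y hy)) a b h hW with h1 | ⟨_, hF, _⟩
  · exact h1
  · exact hF.elim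

-- ==== facts about A's neigh dict ====
theorem mcNeigh_inner_keys (each : List Int) (d : PySem.Dict Int (PySem.Set Int)) :
    (each.foldl (fun neigh item => neigh.modify item [] (fun s => PySem.Set.update s each)) d).keys
      = PySem.Set.update d.keys each :=
  PySem.Dict.keys_foldl_modify each [] (fun _ _ s => PySem.Set.update s each) d

theorem mcNeigh_keys_gen (ls : List (List Int)) : ∀ (d : PySem.Dict Int (PySem.Set Int)),
    (ls.foldl (fun neigh each =>
        each.foldl (fun neigh item => neigh.modify item [] (fun s => PySem.Set.update s each)) neigh) d).keys
      = PySem.Set.update d.keys ls.flatten := by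
  induction ls with
  | nil => intro d; simp [PySem.Set.update_nil]
  | cons each rest ih =>
    intro d
    simp only [List.foldl_cons, List.flatten_cons]
    rw [ih, mcNeigh_inner_keys, PySem.Set.update_append]

theorem mcNeigh_keys (lists : List (List Int)) : (mcNeigh lists).keys = mcU lists := by
  unfold mcNeigh
  rw [mcNeigh_keys_gen, PySem.Dict.keys_empty, mcU]
  exact PySem.Set.update_nil_left _

theorem mcNeigh_getD_inner (each : List Int) (x y : Int) : ∀ (rem : List Int) (d : PySem.Dict Int (PySem.Set Int)),
    (y ∈ (rem.foldl (fun neigh item => neigh.modify item [] (fun s => PySem.Set.update s each)) d).getD x []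
      ↔ y ∈ d.getD x [] ∨ (x ∈ rem ∧ y ∈ each)) := by
  intro rem
  induction rem with
  | nil => intro d; simp
  | cons item rest ih =>
    intro d
    simp only [List.foldl_cons]
    rw [ih, PySem.Dict.getD_modify]
    by_cases hx : x = item
    · subst hx
      rw [if_pos rfl]
      simp only [PySem.Set.mem_update, List.mem_cons, true_or, true_and]
      tauto
    · simp only [if_neg hx, List.mem_cons]
      tauto

theorem mcNeigh_getD_gen (x y : Int) : ∀ (ls : List (List Int)) (d : PySem.Dict Int (PySem.Set Int)),
    (y ∈ (ls.foldl (fun neigh each =>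
        each.foldl (fun neigh item => neigh.modify item [] (fun s => PySem.Set.update s each)) neigh) d).getD x []
      ↔ y ∈ d.getD x [] ∨ ∃ l ∈ ls, x ∈ l ∧ y ∈ l) := by
  intro ls
  induction ls with
  | nil => intro d; simp
  | cons each rest ih =>
    intro d
    simp only [List.foldl_cons]
    rw [ih, mcNeigh_getD_inner]
    simp only [List.mem_cons]
    constructor
    · rintro ((h | ⟨hx, hy⟩) | ⟨l, hl, hxl, hyl⟩)
      · exact Or.inl h
      · exact Or.inr ⟨each, Or.inl rfl, hx, hy⟩
      · exact Or.inr ⟨l, Or.inr hl, hxl, hyl⟩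
    · rintro (h | ⟨l, (rfl | hl), hxl, hyl⟩)
      · exact Or.inl (Or.inl h)
      · exact Or.inl (Or.inr ⟨hxl, hyl⟩)
      · exact Or.inr ⟨l, hl, hxl, hyl⟩

theorem mcNeigh_getD (lists : List (List Int)) (x y : Int) :
    y ∈ (mcNeigh lists).getD x [] ↔ mcLinked lists x y := by
  unfold mcNeigh
  rw [mcNeigh_getD_gen]
  simp [mcLinked, PySem.Dict.getD_empty]

-- ==== A's BFS computes the connected component ====
theorem mcComp_spec (lists : List (List Int)) :
    ∀ (fuel : Nat) (S V acc : List Int),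
      S.Nodup → V.Nodup → acc.Nodup →
      (∀ x ∈ S, x ∉ V) → (∀ x ∈ acc, x ∈ V) →
      (∀ x ∈ S, x ∈ mcU lists) → (∀ x ∈ V, x ∈ mcU lists) →
      (∀ v ∈ V, ∀ y, mcLinked lists v y → y ∈ V ∨ y ∈ S) →
      ((mcU lists).length + 1 ≤ V.length + fuel ∨ S = []) →
      ((∀ y, y ∈ (mcComp (mcNeigh lists) fuel S V acc).1 ↔ y ∈ V ∨ ∃ s ∈ S, mcConn lists s y) ∧
       (∀ y, y ∈ (mcComp (mcNeigh lists) fuel S V acc).2 ↔ y ∈ acc ∨ ((∃ s ∈ S, mcConn lists s y) ∧ y ∉ V)) ∧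
       (mcComp (mcNeigh lists) fuel S V acc).1.Nodup ∧
       (mcComp (mcNeigh lists) fuel S V acc).2.Nodup ∧
       (∀ x ∈ (mcComp (mcNeigh lists) fuel S V acc).1, x ∈ mcU lists) ∧
       (∀ v ∈ (mcComp (mcNeigh lists) fuel S V acc).1, ∀ y, mcLinked lists v y → y ∈ (mcComp (mcNeigh lists) fuel S V acc).1)) := by
  intro fuel
  induction fuel with
  | zero =>
    intro S V acc hS hV hacc hSV haccV hSU hVU hfr hfuel
    have hSnil : S = [] := by
      rcases hfuel with h | h
      · exfalso; have := (hV.subperm hVU).length_le; omega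
      · exact h
    subst hSnil
    refine ⟨by simp [mcComp], by simp [mcComp], ?_, ?_, ?_, ?_⟩
    · simpa [mcComp] using hV
    · simpa [mcComp] using hacc
    · simpa [mcComp] using hVU
    · intro v hv y hy
      simp only [mcComp] at hv ⊢
      rcases hfr v hv y hy with h | h
      · exact h
      · simp at h
  | succ fuel ih =>
    intro S V acc hS hV hacc hSV haccV hSU hVU hfr hfuel
    cases S with
    | nil =>
      refine ⟨by simp [mcComp], by simp [mcComp], ?_, ?_, ?_, ?_⟩
      · simpa [mcComp] using hV
      · simpa [mcComp] using hacc
      · simpa [mcComp] using hVU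
      · intro v hv y hy
        simp only [mcComp] at hv ⊢
        rcases hfr v hv y hy with h | h
        · exact h
        · simp at h
    | cons node rest =>
      have hred : mcComp (mcNeigh lists) (fuel + 1) (node :: rest) V acc
          = mcComp (mcNeigh lists) fuel
              (PySem.Set.union rest (PySem.Set.diff ((mcNeigh lists).getD node []) (PySem.Set.add V node)))
              (PySem.Set.add V node) (acc ++ [node]) := rfl
      obtain ⟨hnoderest, hrest⟩ := List.nodup_cons.1 hS
      have hnodeV : node ∉ V := hSV node (List.mem_cons_self ..)
      set V₁ := PySem.Set.add V node with hV₁def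
      set S₁ := PySem.Set.union rest (PySem.Set.diff ((mcNeigh lists).getD node []) V₁) with hS₁def
      have hmemV₁ : ∀ y, y ∈ V₁ ↔ y ∈ V ∨ y = node := fun y => PySem.Set.mem_add V node y
      have hmemS₁ : ∀ y, y ∈ S₁ ↔ y ∈ rest ∨ (mcLinked lists node y ∧ y ∉ V₁) := by
        intro y
        rw [hS₁def, PySem.Set.mem_union, PySem.Set.mem_diff, mcNeigh_getD]
      have hV₁nd : V₁.Nodup := PySem.Set.nodup_add V node hV
      have hS₁nd : S₁.Nodup := PySem.Set.nodup_union _ _ hrest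
      have hlenV₁ : V₁.length = V.length + 1 := by
        rw [hV₁def, PySem.Set.add_of_not_mem hnodeV, List.length_append]
        simp
      have hSV₁ : ∀ x ∈ S₁, x ∉ V₁ := by
        intro z hz
        rcases (hmemS₁ z).1 hz with h | ⟨_, h⟩
        · intro hzV₁
          rcases (hmemV₁ z).1 hzV₁ with h2 | rfl
          · exact hSV z (List.mem_cons_of_mem _ h) h2
          · exact hnoderest h
        · exact h
      have hnodeacc : node ∉ acc := fun h => hnodeV (haccV node h)
      have hacc₁ : (acc ++ [node]).Nodup := by
        rw [List.nodup_append]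
        refine ⟨hacc, List.nodup_singleton _, ?_⟩
        intro a ha b hb
        rw [List.mem_singleton] at hb
        subst hb
        exact fun h => hnodeacc (h ▸ ha)
      have haccV₁ : ∀ x ∈ acc ++ [node], x ∈ V₁ := by
        intro z hz
        rcases List.mem_append.1 hz with h | h
        · exact (hmemV₁ z).2 (Or.inl (haccV z h))
        · simp at h; exact (hmemV₁ z).2 (Or.inr h)
      have hS₁U : ∀ x ∈ S₁, x ∈ mcU lists := by
        intro z hz
        rcases (hmemS₁ z).1 hz with h | ⟨h, _⟩
        · exact hSU z (List.mem_cons_of_mem _ h)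
        · exact mcLinked_mem_right h
      have hV₁U : ∀ x ∈ V₁, x ∈ mcU lists := by
        intro z hz
        rcases (hmemV₁ z).1 hz with h | rfl
        · exact hVU z h
        · exact hSU z (List.mem_cons_self ..)
      have hfr₁ : ∀ v ∈ V₁, ∀ y, mcLinked lists v y → y ∈ V₁ ∨ y ∈ S₁ := by
        intro v hv y hy
        rcases (hmemV₁ v).1 hv with h | rfl
        · rcases hfr v h y hy with h2 | h2
          · exact Or.inl ((hmemV₁ y).2 (Or.inl h2))
          · rcases List.mem_cons.1 h2 with rfl | h3
            · exact Or.inl ((hmemV₁ y).2 (Or.inr rfl))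
            · exact Or.inr ((hmemS₁ y).2 (Or.inl h3))
        · by_cases hyV₁ : y ∈ V₁
          · exact Or.inl hyV₁
          · exact Or.inr ((hmemS₁ y).2 (Or.inr ⟨hy, hyV₁⟩))
      have hfuel₁ : (mcU lists).length + 1 ≤ V₁.length + fuel ∨ S₁ = [] := by
        left
        rcases hfuel with h | h
        · omega
        · exact absurd h (by simp)
      obtain ⟨c1, c2, c3, c4, c5, c6⟩ := ih S₁ V₁ (acc ++ [node]) hS₁nd hV₁nd hacc₁ hSV₁ haccV₁ hS₁U hV₁U hfr₁ hfuel₁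
      have key1 : ∀ y, (y ∈ V₁ ∨ ∃ s ∈ S₁, mcConn lists s y) ↔ (y ∈ V ∨ ∃ s ∈ node :: rest, mcConn lists s y) := by
        intro y
        constructor
        · rintro (hv | ⟨s, hs, hconn⟩)
          · rcases (hmemV₁ y).1 hv with h | rfl
            · exact Or.inl h
            · exact Or.inr ⟨y, List.mem_cons_self .., Relation.ReflTransGen.refl⟩
          · rcases (hmemS₁ s).1 hs with h | ⟨hlink, _⟩
            · exact Or.inr ⟨s, List.mem_cons_of_mem _ h, hconn⟩
            · exact Or.inr ⟨node, List.mem_cons_self .., Relation.ReflTransGen.head hlink hconn⟩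
        · rintro (hv | ⟨s, hs, hconn⟩)
          · exact Or.inl ((hmemV₁ y).2 (Or.inl hv))
          · rcases List.mem_cons.1 hs with rfl | hsrest
            · rcases mcEscape (W := (· ∈ V₁)) (T := (· ∈ S₁)) (fun v hv z hz => hfr₁ v hv z hz)
                s y hconn ((hmemV₁ s).2 (Or.inr rfl)) with h | ⟨t, ht, hconn2⟩
              · exact Or.inl h
              · exact Or.inr ⟨t, ht, hconn2⟩
            · exact Or.inr ⟨s, (hmemS₁ s).2 (Or.inl hsrest), hconn⟩
      have key2 : ∀ y, (y ∈ acc ++ [node] ∨ ((∃ s ∈ S₁, mcConn lists s y) ∧ y ∉ V₁))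
          ↔ (y ∈ acc ∨ ((∃ s ∈ node :: rest, mcConn lists s y) ∧ y ∉ V)) := by
        intro y
        constructor
        · rintro (hy | ⟨⟨s, hs, hconn⟩, hyV₁⟩)
          · rcases List.mem_append.1 hy with h | h
            · exact Or.inl h
            · simp at h
              subst h
              exact Or.inr ⟨⟨y, List.mem_cons_self .., Relation.ReflTransGen.refl⟩, hnodeV⟩
          · have hyV : y ∉ V := fun h => hyV₁ ((hmemV₁ y).2 (Or.inl h))
            rcases (hmemS₁ s).1 hs with h | ⟨hlink, _⟩
            · exact Or.inr ⟨⟨s, List.mem_cons_of_mem _ h, hconn⟩, hyV⟩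
            · exact Or.inr ⟨⟨node, List.mem_cons_self .., Relation.ReflTransGen.head hlink hconn⟩, hyV⟩
        · rintro (hy | ⟨⟨s, hs, hconn⟩, hyV⟩)
          · exact Or.inl (List.mem_append.2 (Or.inl hy))
          · by_cases hynode : y = node
            · subst hynode
              exact Or.inl (List.mem_append.2 (Or.inr (List.mem_singleton.2 rfl)))
            · have hyV₁ : y ∉ V₁ := by
                intro h
                rcases (hmemV₁ y).1 h with h2 | h2
                · exact hyV h2
                · exact hynode h2
              rcases List.mem_cons.1 hs with rfl | hsrest
              · rcases mcEscape (W := (· ∈ V₁)) (T := (· ∈ S₁)) (fun v hv z hz => hfr₁ v hv z hz)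
                  s y hconn ((hmemV₁ s).2 (Or.inr rfl)) with h | ⟨t, ht, hconn2⟩
                · exact absurd h hyV₁
                · exact Or.inr ⟨⟨t, ht, hconn2⟩, hyV₁⟩
              · exact Or.inr ⟨⟨s, (hmemS₁ s).2 (Or.inl hsrest), hconn⟩, hyV₁⟩
      rw [hred]
      exact ⟨fun y => (c1 y).trans (key1 y), fun y => (c2 y).trans (key2 y), c3, c4, c5, c6⟩

-- ==== B's saturation computes the connected component ====
theorem mcPass_spec (lists : List (List Int)) :
    ∀ (rem : List (List Int)), (∀ l ∈ rem, l ∈ lists) →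
    ∀ (c : PySem.Set Int) (b : Bool), c.Nodup →
      ((∀ y ∈ c, y ∈ (rem.foldl (fun st l =>
          if PySem.Set.inter st.1 l ≠ [] ∧ ¬(PySem.Set.issuperset st.1 l = true)
          then (PySem.Set.update st.1 l, true) else st) (c, b)).1) ∧
       (rem.foldl (fun st l =>
          if PySem.Set.inter st.1 l ≠ [] ∧ ¬(PySem.Set.issuperset st.1 l = true)
          then (PySem.Set.update st.1 l, true) else st) (c, b)).1.Nodup ∧
       (∀ y ∈ (rem.foldl (fun st l =>
          if PySem.Set.inter st.1 l ≠ [] ∧ ¬(PySem.Set.issuperset st.1 l = true)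
          then (PySem.Set.update st.1 l, true) else st) (c, b)).1, y ∈ c ∨ ∃ s ∈ c, mcConn lists s y) ∧
       ((rem.foldl (fun st l =>
          if PySem.Set.inter st.1 l ≠ [] ∧ ¬(PySem.Set.issuperset st.1 l = true)
          then (PySem.Set.update st.1 l, true) else st) (c, b)).2 = false →
         (rem.foldl (fun st l =>
          if PySem.Set.inter st.1 l ≠ [] ∧ ¬(PySem.Set.issuperset st.1 l = true)
          then (PySem.Set.update st.1 l, true) else st) (c, b)).1 = c ∧ b = false ∧
         ∀ l ∈ rem, (∃ z ∈ l, z ∈ c) → ∀ y ∈ l, y ∈ c) ∧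
       (c.length ≤ (rem.foldl (fun st l =>
          if PySem.Set.inter st.1 l ≠ [] ∧ ¬(PySem.Set.issuperset st.1 l = true)
          then (PySem.Set.update st.1 l, true) else st) (c, b)).1.length) ∧
       (b = false → (rem.foldl (fun st l =>
          if PySem.Set.inter st.1 l ≠ [] ∧ ¬(PySem.Set.issuperset st.1 l = true)
          then (PySem.Set.update st.1 l, true) else st) (c, b)).2 = true →
         c.length < (rem.foldl (fun st l =>
          if PySem.Set.inter st.1 l ≠ [] ∧ ¬(PySem.Set.issuperset st.1 l = true)
          then (PySem.Set.update st.1 l, true) else st) (c, b)).1.length)) := by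
  intro rem
  induction rem with
  | nil =>
    intro _ c b hc
    refine ⟨fun y hy => hy, hc, fun y hy => Or.inl hy, ?_, le_refl _, ?_⟩
    · intro h
      exact ⟨rfl, by simpa using h, by simp⟩
    · intro hb h
      simp at h
      rw [h] at hb
      exact absurd hb (by simp)
  | cons l rest ih =>
    intro hrem c b hc
    have hlin : l ∈ lists := hrem l (List.mem_cons_self ..)
    have hrem' : ∀ l' ∈ rest, l' ∈ lists := fun l' h => hrem l' (List.mem_cons_of_mem _ h)
    simp only [List.foldl_cons]
    by_cases hcond : PySem.Set.inter c l ≠ [] ∧ ¬(PySem.Set.issuperset c l = true)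
    · rw [if_pos hcond]
      set c₁ := PySem.Set.update c l with hc₁def
      have hc₁nd : c₁.Nodup := PySem.Set.nodup_update c l hc
      have hcc₁ : ∀ y ∈ c, y ∈ c₁ := fun y hy => (PySem.Set.mem_update c l y).2 (Or.inl hy)
      obtain ⟨i1, i2, i3, i4, i5, i6⟩ := ih hrem' c₁ true hc₁nd
      -- a witness z in both c and l
      obtain ⟨z, hz⟩ := List.exists_mem_of_ne_nil _ hcond.1
      have hzc : z ∈ c := ((PySem.Set.mem_inter c l z).1 hz).1
      have hzl : z ∈ l := ((PySem.Set.mem_inter c l z).1 hz).2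
      have hgrow : c.length < c₁.length := by
        have hex : ∃ x ∈ l, x ∉ c := by
          rcases Decidable.em (∀ x ∈ l, x ∈ c) with hall | hnot
          · exact absurd ((PySem.Set.issuperset_iff c l).2 hall) hcond.2
          · simpa using hnot
        obtain ⟨x, hxl, hxc⟩ := hex
        rw [hc₁def, PySem.Set.update_eq_append_filter, List.length_append]
        have : x ∈ List.filter (fun y => !PySem.Set.contains c y) (PySem.Set.ofList l) := by
          rw [List.mem_filter]
          refine ⟨(PySem.Set.mem_ofList l x).2 hxl, ?_⟩
          simp only [Bool.not_eq_eq_eq_not, Bool.not_true]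
          rw [← Bool.not_eq_true]
          intro hcontains
          exact hxc ((PySem.Set.contains_iff c x).1 hcontains)
        have := List.length_pos_of_mem this
        omega
      refine ⟨fun y hy => i1 y (hcc₁ y hy), i2, ?_, ?_, by omega, fun _ _ => by omega⟩
      · intro y hy
        rcases i3 y hy with h | ⟨s, hs, hconn⟩
        · rcases (PySem.Set.mem_update c l y).1 h with h2 | h2
          · exact Or.inl h2
          · exact Or.inr ⟨z, hzc, Relation.ReflTransGen.single ⟨l, hlin, hzl, h2⟩⟩
        · rcases (PySem.Set.mem_update c l s).1 hs with h2 | h2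
          · exact Or.inr ⟨s, h2, hconn⟩
          · exact Or.inr ⟨z, hzc, Relation.ReflTransGen.head ⟨l, hlin, hzl, h2⟩ hconn⟩
      · intro hfalse
        obtain ⟨_, hb, _⟩ := i4 hfalse
        exact absurd hb (by simp)
    · rw [if_neg hcond]
      obtain ⟨i1, i2, i3, i4, i5, i6⟩ := ih hrem' c b hc
      refine ⟨i1, i2, i3, ?_, i5, i6⟩
      intro hfalse
      obtain ⟨he, hb, hclosed⟩ := i4 hfalse
      refine ⟨he, hb, ?_⟩
      intro l' hl' hint
      rcases List.mem_cons.1 hl' with rfl | h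
      · intro y hy
        rw [Classical.not_and_iff_not_or_not] at hcond
        rcases hcond with h2 | h2
        · exfalso
          obtain ⟨z, hzl, hzc⟩ := hint
          rw [not_not] at h2
          have : z ∈ PySem.Set.inter c l' := (PySem.Set.mem_inter c l' z).2 ⟨hzc, hzl⟩
          rw [h2] at this
          simp at this
        · rw [not_not] at h2
          exact (PySem.Set.issuperset_iff c l').1 h2 y hy
      · exact hclosed l' h hint

theorem mcSat_spec (lists : List (List Int)) :
    ∀ (fuel : Nat) (comp : PySem.Set Int) (x : Int),
      x ∈ comp → comp.Nodup → (∀ y ∈ comp, mcConn lists x y) →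
      (∀ y ∈ comp, y ∈ mcU lists) → x ∈ mcU lists →
      (mcU lists).length + 1 ≤ comp.length + fuel →
      ((∀ y, y ∈ mcSat lists fuel comp ↔ mcConn lists x y) ∧ (mcSat lists fuel comp).Nodup) := by
  intro fuel
  induction fuel with
  | zero =>
    intro comp x hx hnd hconn hsubU hxU hfuel
    exfalso
    have := (hnd.subperm hsubU).length_le
    omega
  | succ fuel ih =>
    intro comp x hx hnd hconn hsubU hxU hfuel
    obtain ⟨p1, p2, p3, p4, p5, p6⟩ := mcPass_spec lists lists (fun _ h => h) comp false hnd
    have hred : mcSat lists (fuel + 1) comp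
        = if (mcPass lists (comp, false)).2 then mcSat lists fuel (mcPass lists (comp, false)).1
          else (mcPass lists (comp, false)).1 := rfl
    have hpass : mcPass lists (comp, false) = lists.foldl (fun st l =>
          if PySem.Set.inter st.1 l ≠ [] ∧ ¬(PySem.Set.issuperset st.1 l = true)
          then (PySem.Set.update st.1 l, true) else st) (comp, false) := rfl
    rw [hred, hpass]
    by_cases hb : (lists.foldl (fun st l =>
          if PySem.Set.inter st.1 l ≠ [] ∧ ¬(PySem.Set.issuperset st.1 l = true)
          then (PySem.Set.update st.1 l, true) else st) (comp, false)).2 = true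
    · rw [if_pos hb]
      have hconn' : ∀ y ∈ (lists.foldl (fun st l =>
          if PySem.Set.inter st.1 l ≠ [] ∧ ¬(PySem.Set.issuperset st.1 l = true)
          then (PySem.Set.update st.1 l, true) else st) (comp, false)).1, mcConn lists x y := by
        intro y hy
        rcases p3 y hy with h | ⟨s, hs, hc⟩
        · exact hconn y h
        · exact (hconn s hs).trans hc
      exact ih _ x (p1 x hx) p2 hconn'
        (fun y hy => mcConn_mem (hconn' y hy) hxU) hxU
        (by have := p6 rfl hb; omega)
    · rw [if_neg hb]
      rw [Bool.not_eq_true] at hb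
      obtain ⟨heq, _, hstable⟩ := p4 hb
      rw [heq]
      have hclosed : ∀ v ∈ comp, ∀ y, mcLinked lists v y → y ∈ comp := by
        intro v hv y ⟨l, hl, hvl, hyl⟩
        exact hstable l hl ⟨v, hvl, hv⟩ y hyl
      refine ⟨fun y => ⟨hconn y, ?_⟩, hnd⟩
      intro hcy
      exact mcClosed_reach (W := (· ∈ comp)) hclosed x y hcy hx

-- ==== the two key lists agree ====
theorem mcKeys_inner (l : List Int) : ∀ (s : PySem.Set Int),
    (l.foldl (fun st x => if x ∈ st.1 then st else (PySem.Set.add st.1 x, st.2 ++ [x])) (s, s))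
      = (PySem.Set.update s l, PySem.Set.update s l) := by
  induction l with
  | nil => intro s; simp [PySem.Set.update_nil]
  | cons x xs ih =>
    intro s
    simp only [List.foldl_cons]
    rw [PySem.Set.update_cons]
    by_cases hx : x ∈ s
    · rw [if_pos hx, PySem.Set.add_of_mem hx]
      exact ih s
    · rw [if_neg hx, PySem.Set.add_of_not_mem hx]
      exact ih (s ++ [x])

theorem mcKeys_gen : ∀ (ls : List (List Int)) (s : PySem.Set Int),
    (ls.foldl (fun st l =>
        l.foldl (fun st x => if x ∈ st.1 then st else (PySem.Set.add st.1 x, st.2 ++ [x])) st) (s, s))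
      = (PySem.Set.update s ls.flatten, PySem.Set.update s ls.flatten) := by
  intro ls
  induction ls with
  | nil => intro s; simp [PySem.Set.update_nil]
  | cons l rest ih =>
    intro s
    simp only [List.foldl_cons, List.flatten_cons]
    rw [PySem.Set.update_append, mcKeys_inner]
    exact ih (PySem.Set.update s l)

theorem mcKeys_eq (lists : List (List Int)) : (mcKeys lists).2 = mcU lists := by
  unfold mcKeys
  rw [mcKeys_gen]
  exact PySem.Set.update_nil_left _

-- ==== main emission induction ====
theorem mcMain_aux (lists : List (List Int)) :
    ∀ (ks : List Int), (∀ x ∈ ks, x ∈ mcU lists) →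
    ∀ (V done : PySem.Set Int) (outA outB : List (List Int)),
      (∀ y, y ∈ V ↔ y ∈ done) → V.Nodup → done.Nodup → (∀ x ∈ V, x ∈ mcU lists) →
      (∀ v ∈ V, ∀ y, mcLinked lists v y → y ∈ V) → outA = outB →
      (ks.foldl (fun st node => if node ∈ st.1 then st else
          let r := mcComp (mcNeigh lists) ((mcU lists).length + 1) [node] st.1 []
          (r.1, st.2 ++ [PySem.List.sorted r.2 (fun y => y) false])) (V, outA)).2
      = (ks.foldl (fun st x => if x ∈ st.1 then st else
          let comp := mcSat lists ((mcU lists).length + 1) [x]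
          (PySem.Set.update st.1 comp, st.2 ++ [PySem.List.sorted comp (fun y => y) false])) (done, outB)).2 := by
  intro ks
  induction ks with
  | nil =>
    intro _ V done outA outB _ _ _ _ _ hout
    simpa using hout
  | cons x rest ih =>
    intro hks V done outA outB hVdone hVnd hdonend hVU hclosed hout
    have hxU : x ∈ mcU lists := hks x (List.mem_cons_self ..)
    have hks' : ∀ z ∈ rest, z ∈ mcU lists := fun z h => hks z (List.mem_cons_of_mem _ h)
    simp only [List.foldl_cons]
    by_cases hxV : x ∈ V
    · rw [if_pos hxV, if_pos ((hVdone x).1 hxV)]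
      exact ih hks' V done outA outB hVdone hVnd hdonend hVU hclosed hout
    · have hxdone : x ∉ done := fun h => hxV ((hVdone x).2 h)
      rw [if_neg hxV, if_neg hxdone]
      obtain ⟨a1, a2, a3, a4, a5, a6⟩ := mcComp_spec lists ((mcU lists).length + 1) [x] V []
        (List.nodup_singleton _) hVnd (List.nodup_nil)
        (by intro z hz; simp at hz; subst hz; exact hxV)
        (by simp)
        (by intro z hz; simp at hz; subst hz; exact hxU)
        hVU
        (fun v hv y hy => Or.inl (hclosed v hv y hy))
        (Or.inl (by omega))
      obtain ⟨b1, b2⟩ := mcSat_spec lists ((mcU lists).length + 1) [x] x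
        (List.mem_singleton.2 rfl) (List.nodup_singleton _)
        (by intro y hy; simp at hy; subst hy; exact Relation.ReflTransGen.refl)
        (by intro y hy; simp at hy; subst hy; exact hxU)
        hxU
        (by simp only [List.length_cons, List.length_nil]; omega)
      have hdisj : ∀ y, mcConn lists x y → y ∉ V := by
        intro y hc hyV
        exact hxV (mcClosed_reach (W := (· ∈ V)) hclosed y x (mcConn_symm hc) hyV)
      have hmemr2 : ∀ y, y ∈ (mcComp (mcNeigh lists) ((mcU lists).length + 1) [x] V []).2 ↔ mcConn lists x y := by
        intro y
        rw [a2 y]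
        simp only [List.not_mem_nil, false_or, List.mem_singleton]
        constructor
        · rintro ⟨⟨s, rfl, hc⟩, _⟩
          exact hc
        · intro hc
          exact ⟨⟨x, rfl, hc⟩, hdisj y hc⟩
      have hmemcomp : ∀ y, y ∈ mcSat lists ((mcU lists).length + 1) [x] ↔ mcConn lists x y := b1
      have hperm : (mcComp (mcNeigh lists) ((mcU lists).length + 1) [x] V []).2.Perm
          (mcSat lists ((mcU lists).length + 1) [x]) := by
        rw [List.perm_ext_iff_of_nodup a4 b2]
        intro y
        rw [hmemr2 y, hmemcomp y]
      have hsorted : PySem.List.sorted (mcComp (mcNeigh lists) ((mcU lists).length + 1) [x] V []).2 (fun y => y) false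
          = PySem.List.sorted (mcSat lists ((mcU lists).length + 1) [x]) (fun y => y) false :=
        PySem.List.sorted_eq_sorted_of_perm _ _ _ (fun _ _ h => h) hperm
      have hmemr1 : ∀ y, y ∈ (mcComp (mcNeigh lists) ((mcU lists).length + 1) [x] V []).1
          ↔ y ∈ V ∨ mcConn lists x y := by
        intro y
        rw [a1 y]
        simp only [List.mem_singleton]
        constructor
        · rintro (h | ⟨s, rfl, hc⟩)
          · exact Or.inl h
          · exact Or.inr hc
        · rintro (h | hc)
          · exact Or.inl h
          · exact Or.inr ⟨x, rfl, hc⟩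
      apply ih hks'
      · intro y
        rw [hmemr1 y, PySem.Set.mem_update, hVdone y, hmemcomp y]
      · exact a3
      · exact PySem.Set.nodup_update _ _ hdonend
      · intro z hz
        rcases (hmemr1 z).1 hz with h | hc
        · exact hVU z h
        · exact mcConn_mem hc hxU
      · intro v hv y hy
        rcases (hmemr1 v).1 hv with h | hc
        · exact (hmemr1 y).2 (Or.inl (hclosed v h y hy))
        · exact (hmemr1 y).2 (Or.inr (hc.tail hy))
      · rw [hout, hsorted]

theorem mcMain (lists : List (List Int)) : merge_common lists = merge_common_alt lists := by
  have hA : merge_common lists = (((mcNeigh lists).keys).foldl (fun st node => if node ∈ st.1 then st else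
      let r := mcComp (mcNeigh lists) (((mcNeigh lists).keys).length + 1) [node] st.1 []
      (r.1, st.2 ++ [PySem.List.sorted r.2 (fun y => y) false]))
      (([] : PySem.Set Int), ([] : List (List Int)))).2 := rfl
  have hB : merge_common_alt lists = (((mcKeys lists).2).foldl (fun st x => if x ∈ st.1 then st else
      let comp := mcSat lists (((mcKeys lists).2).length + 1) [x]
      (PySem.Set.update st.1 comp, st.2 ++ [PySem.List.sorted comp (fun y => y) false]))
      (([] : PySem.Set Int), ([] : List (List Int)))).2 := rfl
  rw [hA, hB, mcNeigh_keys, mcKeys_eq]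
  exact mcMain_aux lists (mcU lists) (fun _ h => h) [] [] [] []
    (fun _ => Iff.rfl) List.nodup_nil List.nodup_nil (by simp) (by simp) rfl

-- ===== VERDICT (by name: the statement is the Claim_ definition above) =====
theorem merge_common_spec : Claim_equal_merge_common := by
  intro lists _
  unfold Spec_merge_common
  exact mcMain lists
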